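-- pv_equiv track=rewrite | github.com/flatironinstitute/figpack | extension_packages/figpack_slides/figpack_slides/edit_server.py | _update_title
-- ===== SOURCE A (Python) =====
-- def _update_title(slide_content: str, new_title: str) -> str:
--     """
--     Update the title line in a slide
--
--     Args:
--         slide_content: The content of a single slide
--         new_title: The new title text
--
--     Returns:
--         Updated slide content
--     """
--     lines = slide_content.split("\n")
--     updated_lines = []
--     title_found = False
--
--     for line in lines:
--         if not title_found and line.strip().startswith("# "):
--             # Replace the title line
--             updated_lines.append(f"# {new_title}")
--             title_found = True
--         else:
--             updated_lines.append(line)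
--
--     return "\n".join(updated_lines)
-- ===== SOURCE B (Python) =====
-- def _update_title(slide_content: str, new_title: str) -> str:
--     # Scan the raw string line by line via find("\n") and splice the new title
--     # in with slicing; no list is built and no join is performed.
--     pos = 0
--     while True:
--         nl = slide_content.find("\n", pos)
--         end = len(slide_content) if nl == -1 else nl
--         if slide_content[pos:end].strip().startswith("# "):
--             return slide_content[:pos] + "# " + new_title + slide_content[end:]
--         if nl == -1:
--             return slide_content
--         pos = nl + 1
-- ===== Notes on version B (the rewrite author's own statement) =====
-- stated objective: alternative
-- what changed: B never splits the string into a line list: it scans the raw string with find("\n", pos), tests each slice in place, and splices the new title in with string slicing, returning the original string object untouched when no title line exists, instead of A's split / flagged rebuild loop / join.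
import Mathlib
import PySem

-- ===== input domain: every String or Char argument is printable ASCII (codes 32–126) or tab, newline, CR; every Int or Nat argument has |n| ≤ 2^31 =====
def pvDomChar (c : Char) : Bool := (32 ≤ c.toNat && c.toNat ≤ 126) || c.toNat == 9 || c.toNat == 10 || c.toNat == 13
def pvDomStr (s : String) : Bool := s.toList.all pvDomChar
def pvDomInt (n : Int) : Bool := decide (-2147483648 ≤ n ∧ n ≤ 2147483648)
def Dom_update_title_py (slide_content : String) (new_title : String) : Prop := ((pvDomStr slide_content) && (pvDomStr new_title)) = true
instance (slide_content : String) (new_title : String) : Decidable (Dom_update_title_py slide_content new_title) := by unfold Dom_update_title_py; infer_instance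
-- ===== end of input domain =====

-- B scans the raw string itself (find the next "\n", test the slice, splice with
-- string slicing) instead of A's split-into-lines / flagged rebuild / join
-- (objective: alternative).

-- ===== PORT A =====
-- s.split("\n") (sep nonempty, so split? is always some)
def pySplitNl (s : String) : List String := (PySem.Str.split? s "\n").getD [s]

-- the body of A's for-loop, acting on the state (updated_lines, title_found)
def stepA (new_title : String) (st : List String × Bool) (line : String) : List String × Bool :=
  if !st.2 && PySem.Str.startswith (PySem.Str.strip line) "# " then
    (st.1 ++ ["# " ++ new_title], true)
  else
    (st.1 ++ [line], st.2)

def update_title_py (slide_content : String) (new_title : String) : String :=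
  let lines := pySplitNl slide_content
  let st := lines.foldl (stepA new_title) ([], false)
  PySem.Str.join "\n" st.1

-- ===== PORT B =====
-- B's while-loop: pre = slide_content[:pos] (already scanned), rest = slide_content[pos:];
-- slide_content.find("\n", pos) ↦ rest.findIdx? (· == '\n'); the slices are take/drop.
def scanB (nt : List Char) (pre rest : List Char) : List Char :=
  match h : rest.findIdx? (fun c => c == '\n') with
  | none =>
      if PySem.Chars.startswith (PySem.Chars.strip rest) ['#', ' '] then
        pre ++ '#' :: ' ' :: nt
      else
        pre ++ rest
  | some i =>
      if PySem.Chars.startswith (PySem.Chars.strip (rest.take i)) ['#', ' '] then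
        pre ++ ('#' :: ' ' :: nt) ++ rest.drop i
      else
        scanB nt (pre ++ rest.take (i + 1)) (rest.drop (i + 1))
termination_by rest.length
decreasing_by
  have hne : rest ≠ [] := by intro he; subst he; simp at h
  have : 0 < rest.length := List.length_pos_of_ne_nil hne
  simp only [List.length_drop]; omega

def update_title_py_alt (slide_content : String) (new_title : String) : String :=
  String.ofList (scanB new_title.toList [] slide_content.toList)

-- ===== PRECONDITION & SPEC =====
def Spec_update_title_py (slide_content : String) (new_title : String) (out : String) : Prop := out = update_title_py_alt slide_content new_title
instance (slide_content : String) (new_title : String) (out : String) : Decidable (Spec_update_title_py slide_content new_title out) := by unfold Spec_update_title_py; infer_instance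

-- ===== CLAIM (what is proved, stated in full; the proofs are below) =====
def Claim_equal_update_title_py : Prop := ∀ (slide_content : String) (new_title : String), Dom_update_title_py slide_content new_title → Spec_update_title_py slide_content new_title (update_title_py slide_content new_title)

-- ===== LEMMAS AND PROOFS =====

-- the split of a char list at '\n', in clean structural form
def splitNl : List Char → List (List Char)
  | [] => [[]]
  | c :: r =>
      if c = '\n' then [] :: splitNl r
      else
        match splitNl r with
        | h :: t => (c :: h) :: t
        | [] => [[c]]

theorem splitNl_ne_nil (cs : List Char) : splitNl cs ≠ [] := by
  cases cs with
  | nil => simp [splitNl]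
  | cons c r =>
    simp only [splitNl]
    split_ifs
    · simp
    · cases splitNl r <;> simp

-- prepend a prefix to the first piece
def modFirst (p : List Char) : List (List Char) → List (List Char)
  | [] => [p]
  | h :: t => (p ++ h) :: t

theorem go_zero (l cur : List Char) (acc : List (List Char)) :
    PySem.Chars.splitOn.go ['\n'] 0 l cur acc = ((cur.reverse ++ l) :: acc).reverse := by
  rw [PySem.Chars.splitOn.go]

theorem go_succ_nil (f : Nat) (cur : List Char) (acc : List (List Char)) :
    PySem.Chars.splitOn.go ['\n'] (f + 1) [] cur acc = (cur.reverse :: acc).reverse := by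
  rw [PySem.Chars.splitOn.go]
  omega

theorem go_succ_cons (f : Nat) (c : Char) (r cur : List Char) (acc : List (List Char)) :
    PySem.Chars.splitOn.go ['\n'] (f + 1) (c :: r) cur acc =
      if c = '\n' then PySem.Chars.splitOn.go ['\n'] f r [] (cur.reverse :: acc)
      else PySem.Chars.splitOn.go ['\n'] f r (c :: cur) acc := by
  rw [PySem.Chars.splitOn.go]
  by_cases hc : c = '\n'
  · simp [hc, List.isPrefixOf]
  · have hp : List.isPrefixOf ['\n'] (c :: r) = false := by
      simp [List.isPrefixOf]
      exact fun he => hc he.symm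
    simp [hp, hc]

theorem splitNl_cons_ex (r : List Char) : ∃ h t, splitNl r = h :: t := by
  cases hsp : splitNl r with
  | nil => exact absurd hsp (splitNl_ne_nil r)
  | cons h t => exact ⟨h, t, rfl⟩

theorem splitOn_go_eq (l : List Char) : ∀ (fuel : Nat) (cur : List Char)
    (acc : List (List Char)), l.length ≤ fuel →
    PySem.Chars.splitOn.go ['\n'] fuel l cur acc =
      acc.reverse ++ modFirst cur.reverse (splitNl l) := by
  induction l with
  | nil =>
    intro fuel cur acc _
    cases fuel with
    | zero => rw [go_zero]; simp [splitNl, modFirst]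
    | succ f => rw [go_succ_nil]; simp [splitNl, modFirst]
  | cons c r ih =>
    intro fuel cur acc hf
    cases fuel with
    | zero => simp at hf
    | succ f =>
      rw [go_succ_cons]
      obtain ⟨h, t, hht⟩ := splitNl_cons_ex r
      by_cases hc : c = '\n'
      · subst hc
        rw [if_pos rfl, ih f [] (cur.reverse :: acc) (by simp at hf; omega)]
        simp [splitNl, hht, modFirst]
      · rw [if_neg hc, ih f (c :: cur) acc (by simp at hf; omega)]
        simp [splitNl, hc, hht, modFirst]

theorem splitOn_eq_splitNl (cs : List Char) :
    PySem.Chars.splitOn cs ['\n'] = splitNl cs := by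
  rw [PySem.Chars.splitOn, splitOn_go_eq cs (cs.length + 1) [] [] (by omega)]
  obtain ⟨h, t, hht⟩ := splitNl_cons_ex cs
  simp [hht, modFirst]

-- condition a line is A's title line
def hit (l : List Char) : Bool :=
  PySem.Chars.startswith (PySem.Chars.strip l) ['#', ' ']

-- replace the first hit line
def repl (nt : List Char) : List (List Char) → List (List Char)
  | [] => []
  | h :: t => if hit h then ('#' :: ' ' :: nt) :: t else h :: repl nt t

theorem repl_ne_nil (nt : List Char) (ls : List (List Char)) (h : ls ≠ []) :
    repl nt ls ≠ [] := by
  cases ls with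
  | nil => exact absurd rfl h
  | cons a t => simp only [repl]; split_ifs <;> simp

theorem findIdx_none_splitNl (cs : List Char)
    (h : cs.findIdx? (fun c => c == '\n') = none) : splitNl cs = [cs] := by
  induction cs with
  | nil => simp [splitNl]
  | cons c r ih =>
    rw [List.findIdx?_cons] at h
    by_cases hc : c = '\n'
    · simp [hc] at h
    · rw [if_neg (by simp [hc]), Option.map_eq_none_iff] at h
      simp [splitNl, hc, ih h]

theorem findIdx_some_splitNl (cs : List Char) : ∀ (i : Nat),
    cs.findIdx? (fun c => c == '\n') = some i →
    splitNl cs = cs.take i :: splitNl (cs.drop (i + 1)) ∧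
      cs.drop i = '\n' :: cs.drop (i + 1) := by
  induction cs with
  | nil => intro i h; simp at h
  | cons c r ih =>
    intro i h
    rw [List.findIdx?_cons] at h
    by_cases hc : c = '\n'
    · rw [if_pos (by simp [hc])] at h
      subst hc
      cases h
      simp [splitNl]
    · rw [if_neg (by simp [hc])] at h
      cases hfind : r.findIdx? (fun c => c == '\n') with
      | none => rw [hfind] at h; simp at h
      | some j =>
        rw [hfind] at h
        simp at h
        subst h
        obtain ⟨h1, h2⟩ := ih j hfind
        constructor
        · simp only [splitNl, hc, if_false, List.take_succ_cons, List.drop_succ_cons]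
          rw [h1]
        · simpa using h2

theorem join_cons_ne_nil (sep p : List Char) (rest : List (List Char)) (h : rest ≠ []) :
    PySem.Chars.join sep (p :: rest) = p ++ sep ++ PySem.Chars.join sep rest := by
  cases rest with
  | nil => exact absurd rfl h
  | cons q t => exact PySem.Chars.join_cons_cons sep p q t

theorem join_splitNl (cs : List Char) :
    PySem.Chars.join ['\n'] (splitNl cs) = cs := by
  induction cs with
  | nil => simp [splitNl, PySem.Chars.join_singleton]
  | cons c r ih =>
    obtain ⟨h, t, hht⟩ : ∃ h t, splitNl r = h :: t := by
      cases hsp : splitNl r with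
      | nil => exact absurd hsp (splitNl_ne_nil r)
      | cons h t => exact ⟨h, t, rfl⟩
    by_cases hc : c = '\n'
    · subst hc
      have hsp : splitNl ('\n' :: r) = [] :: splitNl r := by simp [splitNl]
      rw [hsp, join_cons_ne_nil _ _ _ (splitNl_ne_nil r), ih]
      simp
    · simp only [splitNl, hc, if_false, hht]
      cases t with
      | nil =>
        rw [PySem.Chars.join_singleton]
        rw [hht, PySem.Chars.join_singleton] at ih
        rw [ih]
      | cons q t' =>
        rw [PySem.Chars.join_cons_cons]
        rw [hht, PySem.Chars.join_cons_cons] at ih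
        simpa using congrArg (List.cons c) ih

theorem foldA_true (nt : String) (lines : List String) (acc : List String) :
    lines.foldl (stepA nt) (acc, true) = (acc ++ lines, true) := by
  induction lines generalizing acc with
  | nil => simp
  | cons h t ih =>
    rw [List.foldl_cons]
    have hs : stepA nt (acc, true) h = (acc ++ [h], true) := by simp [stepA]
    rw [hs, ih]
    simp

theorem foldA_repl (nt : String) (ls : List (List Char)) : ∀ (acc : List String),
    ((ls.map String.ofList).foldl (stepA nt) (acc, false)).1 =
      acc ++ (repl nt.toList ls).map String.ofList := by
  induction ls with
  | nil => intro acc; simp [repl]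
  | cons h t ih =>
    intro acc
    simp only [List.map_cons, List.foldl_cons]
    by_cases hh : hit h = true
    · have hs : stepA nt (acc, false) (String.ofList h) =
          (acc ++ ["# " ++ nt], true) := by
        simp [stepA, PySem.Str.startswith, PySem.Str.strip]
        exact (by simpa [hit] using hh)
      rw [hs, foldA_true]
      have : String.ofList ('#' :: ' ' :: nt.toList) = "# " ++ nt := by
        apply String.toList_injective
        simp
      simp [repl, hh, this]
    · have hs : stepA nt (acc, false) (String.ofList h) =
          (acc ++ [String.ofList h], false) := by
        simp [stepA, PySem.Str.startswith, PySem.Str.strip]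
        exact eq_false_of_ne_true hh
      rw [hs, ih]
      simp [repl, hh]

theorem scanB_none (nt pre rest : List Char)
    (h : rest.findIdx? (fun c => c == '\n') = none) :
    scanB nt pre rest =
      if PySem.Chars.startswith (PySem.Chars.strip rest) ['#', ' '] then
        pre ++ '#' :: ' ' :: nt
      else pre ++ rest := by
  rw [scanB]
  split
  · rfl
  · next i heq => rw [h] at heq; cases heq

theorem scanB_some (nt pre rest : List Char) (i : Nat)
    (h : rest.findIdx? (fun c => c == '\n') = some i) :
    scanB nt pre rest =
      if PySem.Chars.startswith (PySem.Chars.strip (rest.take i)) ['#', ' '] then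
        pre ++ ('#' :: ' ' :: nt) ++ rest.drop i
      else scanB nt (pre ++ rest.take (i + 1)) (rest.drop (i + 1)) := by
  rw [scanB]
  split
  · next heq => rw [h] at heq; cases heq
  · next j heq =>
    rw [h] at heq
    cases heq
    rfl

theorem scanB_spec (nt : List Char) (pre cs : List Char) :
    scanB nt pre cs = pre ++ PySem.Chars.join ['\n'] (repl nt (splitNl cs)) := by
  induction pre, cs using scanB.induct with
  | case1 pre rest h hhit =>
    rw [scanB_none nt pre rest h, if_pos hhit, findIdx_none_splitNl rest h]
    have : hit rest = true := hhit
    simp [repl, this, PySem.Chars.join_singleton]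
  | case2 pre rest h hhit =>
    rw [scanB_none nt pre rest h, if_neg hhit, findIdx_none_splitNl rest h]
    have : hit rest = false := eq_false_of_ne_true hhit
    simp [repl, this, PySem.Chars.join_singleton]
  | case3 pre rest i h hhit =>
    rw [scanB_some nt pre rest i h, if_pos hhit]
    obtain ⟨h1, h2⟩ := findIdx_some_splitNl rest i h
    rw [h1]
    have hht : hit (rest.take i) = true := hhit
    simp only [repl, hht, if_true]
    rw [join_cons_ne_nil _ _ _ (splitNl_ne_nil _), join_splitNl, h2]
    simp
  | case4 pre rest i h hhit ih =>
    rw [scanB_some nt pre rest i h, if_neg hhit, ih]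
    obtain ⟨h1, h2⟩ := findIdx_some_splitNl rest i h
    rw [h1]
    have hht : hit (rest.take i) = false := eq_false_of_ne_true hhit
    simp only [repl, hht, Bool.false_eq_true, if_false]
    rw [join_cons_ne_nil _ _ _ (repl_ne_nil _ _ (splitNl_ne_nil _))]
    have hget : rest[i]? = some '\n' := by
      have hd : (rest.drop i)[0]? = rest[i + 0]? := List.getElem?_drop
      rw [h2] at hd
      simpa using hd.symm
    have htake : rest.take (i + 1) = rest.take i ++ ['\n'] := by
      rw [List.take_add_one, hget]
      rfl
    rw [htake]
    simp

theorem pySplitNl_eq (s : String) :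
    pySplitNl s = (splitNl s.toList).map String.ofList := by
  rw [pySplitNl, PySem.Str.split?]
  simp only [PySem.Chars.split?]
  simp [splitOn_eq_splitNl]

-- ===== VERDICT (by name: the statement is the Claim_ definition above) =====
theorem update_title_py_spec : Claim_equal_update_title_py := by
  intro sc nt _
  show update_title_py sc nt = update_title_py_alt sc nt
  apply String.toList_injective
  rw [update_title_py_alt, String.toList_ofList, scanB_spec]
  show (PySem.Str.join "\n" ((pySplitNl sc).foldl (stepA nt) ([], false)).1).toList = _
  rw [pySplitNl_eq, foldA_repl, PySem.Str.toList_join]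
  simp [List.map_map, Function.comp_def]
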